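-- pv_equiv track=rewrite | github.com/liub0v/BSU-labs | Computer graphics/10/reduce_noise_on_grayscale_image.py | create_average_operator
-- ===== SOURCE A (Python) =====
-- def create_average_operator(matrix_order, default_value=1):
--     matrix = [[default_value] * matrix_order for _ in range(matrix_order)]
--     matrix_sum = 0
--     median_element = matrix_order // 2
--     for i in range(matrix_order):
--         for j in range(matrix_order):
--             if i <= median_element and j <= median_element:
--                 matrix[i][j] **= i + j
--             elif i <= median_element:
--                 matrix[i][j] = matrix[i][matrix_order - 1 - j]
--             elif j <= median_element:
--                 matrix[i][j] = matrix[matrix_order - 1 - i][j]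
--             else:
--                 matrix[i][j] = matrix[matrix_order - 1 - i][matrix_order - 1 - j]
--             matrix_sum += matrix[i][j]
--     return matrix, matrix_sum
-- ===== SOURCE B (Python) =====
-- def create_average_operator(matrix_order, default_value=1):
--     m = matrix_order // 2
--     h = [k if k <= m else matrix_order - 1 - k for k in range(matrix_order)]
--     matrix = [[default_value ** (hi + hj) for hj in h] for hi in h]
--     matrix_sum = sum(sum(row) for row in matrix)
--     return matrix, matrix_sum
-- ===== Notes on version B (the rewrite author's own statement) =====
-- stated objective: simpler
-- what changed: Replaces the quadrant case analysis and cross-cell copies by a precomputed 1-D exponent profile h and a uniform closed-form fill matrix[i][j] = default_value ** (h[i] + h[j]), with the sum taken over the finished matrix.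
import Mathlib
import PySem

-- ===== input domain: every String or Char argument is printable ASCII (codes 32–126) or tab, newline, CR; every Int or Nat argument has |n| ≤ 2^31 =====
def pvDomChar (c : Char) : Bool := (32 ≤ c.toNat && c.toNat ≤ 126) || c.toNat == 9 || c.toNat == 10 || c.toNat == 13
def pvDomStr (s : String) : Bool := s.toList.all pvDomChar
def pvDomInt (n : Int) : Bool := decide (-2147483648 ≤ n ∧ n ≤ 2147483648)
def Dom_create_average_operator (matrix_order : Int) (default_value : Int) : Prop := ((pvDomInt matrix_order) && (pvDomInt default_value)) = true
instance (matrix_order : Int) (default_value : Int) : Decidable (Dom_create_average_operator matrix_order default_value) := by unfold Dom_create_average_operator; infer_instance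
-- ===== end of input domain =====

-- B replaces A's quadrant case analysis and cross-cell copies by a precomputed 1-D exponent
-- profile and a uniform closed-form fill (objective: simpler); equal results on all inputs.


-- ===== PORT A =====
-- matrix[i][j] read / write; indices produced by A's loops are always in range, so getD/set are exact
def pvGet2 (m : List (List Int)) (i j : Nat) : Int := (m.getD i []).getD j 0
def pvSet2 (m : List (List Int)) (i j : Nat) (v : Int) : List (List Int) :=
  m.set i ((m.getD i []).set j v)

-- body of the inner j-loop (one cell of row i: exactly A's four branches, then the sum update)
def pvStepA (n : Nat) (median : Int) (i : Nat) (st : List (List Int) × Int) (j : Nat) :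
    List (List Int) × Int :=
  let v :=
    if (i : Int) ≤ median ∧ (j : Int) ≤ median then (pvGet2 st.1 i j) ^ (i + j)
    else if (i : Int) ≤ median then pvGet2 st.1 i (n - 1 - j)
    else if (j : Int) ≤ median then pvGet2 st.1 (n - 1 - i) j
    else pvGet2 st.1 (n - 1 - i) (n - 1 - j)
  (pvSet2 st.1 i j v, st.2 + v)

-- body of the outer i-loop
def pvRowA (n : Nat) (median : Int) (st : List (List Int) × Int) (i : Nat) :
    List (List Int) × Int :=
  (List.range n).foldl (pvStepA n median i) st

-- range(matrix_order) is empty for matrix_order ≤ 0, so .toNat is exact here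
def create_average_operator (matrix_order : Int) (default_value : Int) : List (List Int) × Int :=
  let n := matrix_order.toNat
  let median := PySem.Int.floordiv matrix_order 2
  (List.range n).foldl (pvRowA n median)
    (List.replicate n (List.replicate n default_value), 0)

-- ===== PORT B =====
def create_average_operator_alt (matrix_order : Int) (default_value : Int) : List (List Int) × Int :=
  let n := matrix_order.toNat
  let median := PySem.Int.floordiv matrix_order 2
  let h : List Nat := (List.range n).map (fun (k : Nat) => if (k : Int) ≤ median then k else n - 1 - k)
  let matrix := h.map (fun hi => h.map (fun hj => default_value ^ (hi + hj)))
  (matrix, (matrix.map (fun row => row.sum)).sum)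

-- ===== PRECONDITION & SPEC =====
def Spec_create_average_operator (matrix_order : Int) (default_value : Int) (out : List (List Int) × Int) : Prop := out = create_average_operator_alt matrix_order default_value
instance (matrix_order : Int) (default_value : Int) (out : List (List Int) × Int) : Decidable (Spec_create_average_operator matrix_order default_value out) := by unfold Spec_create_average_operator; infer_instance

-- ===== CLAIM (what is proved, stated in full; the proofs are below) =====
def Claim_equal_create_average_operator : Prop := ∀ (matrix_order : Int) (default_value : Int), Dom_create_average_operator matrix_order default_value → Spec_create_average_operator matrix_order default_value (create_average_operator matrix_order default_value)

-- ===== LEMMAS AND PROOFS =====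

-- the symmetric exponent profile, in Nat form (n = matrix_order.toNat, n > 0)
def pvHf (n k : Nat) : Nat := if k ≤ n / 2 then k else n - 1 - k
def pvCell (n : Nat) (d : Int) (i j : Nat) : Int := d ^ (pvHf n i + pvHf n j)
def pvRow (n : Nat) (d : Int) (i : Nat) : List Int := (List.range n).map (pvCell n d i)
-- A's matrix state with rows < i finished, row i finished up to column j, the rest untouched
def pvPartial (n : Nat) (d : Int) (i j : Nat) : List (List Int) :=
  (List.range n).map (fun r =>
    if r < i then pvRow n d r
    else if r = i then (List.range n).map (fun c => if c < j then pvCell n d i c else d)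
    else List.replicate n d)

lemma pvMapConst {α : Type} (n : Nat) (d : α) (f : Nat → α) (h : ∀ k, f k = d) :
    (List.range n).map f = List.replicate n d := by
  rw [List.map_congr_left (fun k _ => h k), List.map_const', List.length_range]

lemma pvGetD_map_range {α : Type} (n : Nat) (f : Nat → α) (r : Nat) (hr : r < n) (dflt : α) :
    ((List.range n).map f).getD r dflt = f r := by
  simp [List.getD, hr]

lemma pvPartial_zero (n : Nat) (d : Int) :
    pvPartial n d 0 0 = List.replicate n (List.replicate n d) := by
  unfold pvPartial
  exact pvMapConst n _ _ (fun k => by simp [pvMapConst n d (fun _ => d) (fun _ => rfl)])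

lemma pvPartial_row_done (n : Nat) (d : Int) (i : Nat) :
    pvPartial n d i n = pvPartial n d (i + 1) 0 := by
  unfold pvPartial
  refine List.map_congr_left (fun r hr => ?_)
  rw [List.mem_range] at hr
  rcases lt_trichotomy r i with h | h | h
  · rw [if_pos h, if_pos (Nat.lt_succ_of_lt h)]
  · subst h
    rw [if_neg (lt_irrefl r), if_pos rfl, if_pos (Nat.lt_succ_self r)]
    exact List.map_congr_left (fun c hc => by rw [List.mem_range] at hc; rw [if_pos hc])
  · rw [if_neg (by omega), if_neg (by omega), if_neg (by omega)]
    by_cases h4 : r = i + 1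
    · rw [if_pos h4]
      exact (pvMapConst n d _ (fun c => by rw [if_neg (by omega)])).symm
    · rw [if_neg h4]

-- step lemma: one cell of A's inner loop, on the partially-filled matrix
lemma pvStepA_eq (n : Nat) (mo d : Int) (hmo : mo = (n : Int))
    (i j : Nat) (hi : i < n) (hj : j < n) (s : Int) :
    pvStepA n (PySem.Int.floordiv mo 2) i (pvPartial n d i j, s) j
      = (pvPartial n d i (j + 1), s + pvCell n d i j) := by
  subst hmo
  have hmed : ∀ k : Nat, ((k : Int) ≤ PySem.Int.floordiv (n : Int) 2) ↔ k ≤ n / 2 := by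
    intro k
    rw [show ((2:Int) = ((2:Nat):Int)) from rfl, PySem.Int.floordiv_natCast]
    exact_mod_cast Iff.rfl
  have hrowi : (pvPartial n d i j).getD i [] =
      (List.range n).map (fun c => if c < j then pvCell n d i c else d) := by
    unfold pvPartial; rw [pvGetD_map_range n _ i hi]; simp
  have hv : (if (i : Int) ≤ PySem.Int.floordiv (n : Int) 2 ∧ (j : Int) ≤ PySem.Int.floordiv (n : Int) 2
        then (pvGet2 (pvPartial n d i j) i j) ^ (i + j)
      else if (i : Int) ≤ PySem.Int.floordiv (n : Int) 2 then pvGet2 (pvPartial n d i j) i (n - 1 - j)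
      else if (j : Int) ≤ PySem.Int.floordiv (n : Int) 2 then pvGet2 (pvPartial n d i j) (n - 1 - i) j
      else pvGet2 (pvPartial n d i j) (n - 1 - i) (n - 1 - j)) = pvCell n d i j := by
    by_cases h1 : i ≤ n / 2 <;> by_cases h2 : j ≤ n / 2
    · -- both small: read the untouched cell = d
      rw [if_pos ⟨(hmed i).mpr h1, (hmed j).mpr h2⟩]
      unfold pvGet2
      rw [hrowi, pvGetD_map_range n _ j hj, if_neg (lt_irrefl j)]
      simp [pvCell, pvHf, h1, h2]
    · -- i small, j large: read the current row at n-1-j (already final)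
      rw [if_neg (by rw [hmed i, hmed j]; tauto), if_pos ((hmed i).mpr h1)]
      unfold pvGet2
      rw [hrowi, pvGetD_map_range n _ (n - 1 - j) (by omega), if_pos (by omega : n - 1 - j < j)]
      simp [pvCell, pvHf, h1, h2, show n - 1 - j ≤ n / 2 by omega]
    · -- i large, j small: read the finished row n-1-i
      rw [if_neg (by rw [hmed i, hmed j]; tauto), if_neg (by rw [hmed i]; exact h1),
        if_pos ((hmed j).mpr h2)]
      unfold pvGet2 pvPartial
      rw [pvGetD_map_range n _ (n - 1 - i) (by omega), if_pos (by omega : n - 1 - i < i)]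
      rw [pvRow, pvGetD_map_range n _ j hj]
      simp [pvCell, pvHf, h1, h2, show n - 1 - i ≤ n / 2 by omega]
    · -- both large: read the finished row n-1-i at column n-1-j
      rw [if_neg (by rw [hmed i, hmed j]; tauto), if_neg (by rw [hmed i]; exact h1),
        if_neg (by rw [hmed j]; exact h2)]
      unfold pvGet2 pvPartial
      rw [pvGetD_map_range n _ (n - 1 - i) (by omega), if_pos (by omega : n - 1 - i < i)]
      rw [pvRow, pvGetD_map_range n _ (n - 1 - j) (by omega)]
      simp [pvCell, pvHf, h1, h2, show n - 1 - i ≤ n / 2 by omega,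
        show n - 1 - j ≤ n / 2 by omega]
  unfold pvStepA
  simp only [hv]
  refine Prod.ext ?_ rfl
  -- the write: setting cell (i, j) extends the finished prefix of row i by one
  show pvSet2 (pvPartial n d i j) i j (pvCell n d i j) = pvPartial n d i (j + 1)
  unfold pvSet2
  rw [hrowi]
  unfold pvPartial
  apply List.ext_getElem
  · simp
  · intro r h1 h2
    simp only [List.length_map, List.length_range] at h2
    simp only [List.getElem_set, List.getElem_map, List.getElem_range]
    by_cases hr : i = r
    · subst hr
      rw [if_pos rfl, if_neg (lt_irrefl i), if_pos rfl]
      apply List.ext_getElem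
      · simp
      · intro c c1 c2
        simp only [List.length_map, List.length_range] at c2
        simp only [List.getElem_set, List.getElem_map, List.getElem_range]
        by_cases hc : j = c
        · subst hc
          rw [if_pos rfl, if_pos (Nat.lt_succ_self j)]
        · rw [if_neg hc]
          by_cases h : c < j
          · rw [if_pos h, if_pos (by omega : c < j + 1)]
          · rw [if_neg h, if_neg (by omega : ¬ c < j + 1)]
    · rw [if_neg hr]
      split_ifs with hlt hre
      · rfl
      · exact absurd hre.symm hr
      · rfl

lemma pvInner (n : Nat) (mo d : Int) (hmo : mo = (n : Int)) (i : Nat) (hi : i < n) :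
    ∀ j, j ≤ n → ∀ s : Int,
      (List.range j).foldl (pvStepA n (PySem.Int.floordiv mo 2) i) (pvPartial n d i 0, s)
        = (pvPartial n d i j, s + ((List.range j).map (pvCell n d i)).sum) := by
  intro j
  induction j with
  | zero => intro _ s; simp
  | succ j ih =>
    intro hjn s
    rw [List.range_succ, List.foldl_append, ih (by omega) s, List.foldl_cons, List.foldl_nil,
      pvStepA_eq n mo d hmo i j hi (by omega)]
    simp [add_assoc]

lemma pvOuter (n : Nat) (mo d : Int) (hmo : mo = (n : Int)) :
    ∀ i, i ≤ n →
      (List.range i).foldl (pvRowA n (PySem.Int.floordiv mo 2))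
          (List.replicate n (List.replicate n d), 0)
        = (pvPartial n d i 0, ((List.range i).map (fun r => (pvRow n d r).sum)).sum) := by
  intro i
  induction i with
  | zero => intro _; simp [pvPartial_zero]
  | succ i ih =>
    intro hin
    rw [List.range_succ, List.foldl_append, ih (by omega), List.foldl_cons, List.foldl_nil]
    unfold pvRowA
    rw [pvInner n mo d hmo i (by omega) n (le_refl n), pvPartial_row_done]
    simp [pvRow]

-- ===== VERDICT (by name: the statement is the Claim_ definition above) =====
theorem create_average_operator_spec : Claim_equal_create_average_operator := by
  intro mo d _
  show create_average_operator mo d = create_average_operator_alt mo d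
  by_cases hpos : 0 < mo
  · set n := mo.toNat with hnn
    have hmo : mo = (n : Int) := by omega
    have hh : (List.range n).map
          (fun (k : Nat) => if (k : Int) ≤ PySem.Int.floordiv mo 2 then k else n - 1 - k)
        = (List.range n).map (pvHf n) := by
      refine List.map_congr_left (fun k _ => ?_)
      rw [hmo, show ((2:Int) = ((2:Nat):Int)) from rfl, PySem.Int.floordiv_natCast]
      unfold pvHf
      by_cases h : k ≤ n / 2
      · rw [if_pos h, if_pos (by exact_mod_cast h)]
      · rw [if_neg h, if_neg (by exact_mod_cast h)]
    have hfin : pvPartial n d n 0 = (List.range n).map (pvRow n d) := by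
      unfold pvPartial
      exact List.map_congr_left (fun r hr => by rw [List.mem_range] at hr; rw [if_pos hr])
    simp only [create_average_operator, create_average_operator_alt]
    rw [pvOuter n mo d hmo n (le_refl n), hh, hfin]
    refine Prod.ext ?_ ?_
    · simp [List.map_map, Function.comp_def, pvRow, pvCell]
    · simp only [List.map_map, Function.comp_def, pvRow]
      exact congrArg List.sum (List.map_congr_left fun r _ =>
        congrArg List.sum (List.map_congr_left fun c _ => rfl))
  · have h0 : mo.toNat = 0 := by omega
    simp [create_average_operator, create_average_operator_alt, h0]
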